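-- pv_equiv track=rewrite | github.com/Davisfox5/test-5 | backend/app/services/webhook_dispatcher.py | _event_matches
-- ===== SOURCE A (Python) =====
-- from typing import Any, Dict, List, Optional
--
-- def _event_matches(filters: List[str], event: str) -> bool:
--     """Match an event name against a webhook's ``events`` list.
--
--     - ``"*"`` matches anything.
--     - ``"customer.*"`` matches ``customer.<anything>``.
--     - Otherwise an exact string match.
--     """
--     if not filters:
--         return False
--     if "*" in filters:
--         return True
--     if event in filters:
--         return True
--     for f in filters:
--         if f.endswith(".*"):
--             prefix = f[:-2]
--             if event.startswith(prefix + "."):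
--                 return True
--     return False
-- ===== SOURCE B (Python) =====
-- from typing import List
--
-- def _event_matches(filters: List[str], event: str) -> bool:
--     """Derive from the event the finite set of patterns that could match it
--     ('*', the event itself, and 'event[:i].*' for each dot position i), then
--     test each candidate for membership in the filter list."""
--     candidates = ["*", event] + [
--         event[:i] + ".*" for i, ch in enumerate(event) if ch == "."
--     ]
--     return any(c in filters for c in candidates)
-- ===== Notes on version B (the rewrite author's own statement) =====
-- stated objective: alternative
-- what changed: Instead of scanning the filter list and classifying each filter against the event (A's cascade of membership scans plus a wildcard loop), B derives from the event the complete finite list of patterns that could match it ('*', the event itself, and event[:i]+'.*' for every dot position i) and tests each candidate for membership in the filters.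
import Mathlib
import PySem

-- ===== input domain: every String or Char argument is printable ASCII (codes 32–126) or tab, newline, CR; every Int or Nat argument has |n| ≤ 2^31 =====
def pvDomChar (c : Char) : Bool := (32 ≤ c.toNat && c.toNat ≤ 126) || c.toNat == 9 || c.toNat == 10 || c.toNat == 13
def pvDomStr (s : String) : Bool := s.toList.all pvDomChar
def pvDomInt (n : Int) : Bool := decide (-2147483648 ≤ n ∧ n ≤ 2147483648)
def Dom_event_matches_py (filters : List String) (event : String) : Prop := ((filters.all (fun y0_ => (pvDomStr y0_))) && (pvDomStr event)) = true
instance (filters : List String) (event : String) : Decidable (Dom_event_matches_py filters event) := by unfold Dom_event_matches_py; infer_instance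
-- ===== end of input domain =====

-- B derives from the event the finite list of patterns that could match it and tests those for
-- membership in the filter list, instead of scanning the filters and classifying each (objective: alternative).

-- ===== PORT A =====
-- the final 'for f in filters: …' loop of A
def pvLoopA (event : String) : List String → Bool
  | [] => false
  | f :: rest =>
    if PySem.Str.endswith f ".*" then
      let pfx := PySem.Str.slice f none (some (-2))
      if PySem.Str.startswith event (pfx ++ ".") then true
      else pvLoopA event rest
    else pvLoopA event rest

def event_matches_py (filters : List String) (event : String) : Bool :=
  if filters = [] then false
  else if filters.contains "*" then true
  else if filters.contains event then true
  else pvLoopA event filters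

-- ===== PORT B =====
def event_matches_py_alt (filters : List String) (event : String) : Bool :=
  let candidates : List String :=
    ["*", event] ++
      (((PySem.List.enumerate event.toList).filter (fun p => p.2 == '.')).map
        (fun p => PySem.Str.slice event none (some p.1) ++ ".*"))
  candidates.any (fun c => filters.contains c)

-- ===== PRECONDITION & SPEC =====
def Spec_event_matches_py (filters : List String) (event : String) (out : Bool) : Prop := out = event_matches_py_alt filters event
instance (filters : List String) (event : String) (out : Bool) : Decidable (Spec_event_matches_py filters event out) := by unfold Spec_event_matches_py; infer_instance

-- ===== CLAIM (what is proved, stated in full; the proofs are below) =====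
def Claim_equal_event_matches_py : Prop := ∀ (filters : List String) (event : String), Dom_event_matches_py filters event → Spec_event_matches_py filters event (event_matches_py filters event)

-- ===== LEMMAS AND PROOFS =====

lemma pvLoopA_eq_any (event : String) (filters : List String) :
    pvLoopA event filters
      = filters.any (fun f =>
          PySem.Str.endswith f ".*" &&
          PySem.Str.startswith event (PySem.Str.slice f none (some (-2)) ++ ".")) := by
  induction filters with
  | nil => rfl
  | cons f rest ih =>
    simp only [pvLoopA, List.any_cons, ih]
    cases h1 : PySem.Str.endswith f ".*" <;>
      cases h2 : PySem.Str.startswith event (PySem.Str.slice f none (some (-2)) ++ ".") <;>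
        simp

-- membership in PySem.List.enumerate, characterised by index
lemma mem_enumerate_iff {α : Type} (xs : List α) (s : Int) (p : Int × α) :
    p ∈ PySem.List.enumerate xs s ↔ ∃ k : Nat, p.1 = s + k ∧ xs[k]? = some p.2 := by
  induction xs generalizing s with
  | nil => simp [PySem.List.enumerate]
  | cons x t ih =>
    rw [PySem.List.enumerate_cons]
    constructor
    · intro h
      rcases List.mem_cons.mp h with h | h
      · exact ⟨0, by simp [h]⟩
      · rcases (ih (s + 1)).mp h with ⟨k, hk1, hk2⟩
        exact ⟨k + 1, by push_cast at hk1 ⊢; omega, by simpa using hk2⟩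
    · rintro ⟨k, hk1, hk2⟩
      cases k with
      | zero =>
        simp at hk2
        have hp : p = (s, x) := by cases p; simp_all
        rw [hp]
        exact List.mem_cons_self
      | succ k =>
        right
        exact (ih (s + 1)).mpr ⟨k, by push_cast at hk1 ⊢; omega, by simpa using hk2⟩

-- A's per-filter condition holds exactly when f is one of B's dot-derived candidates
lemma cond_iff_candidate (event f : String) :
    (PySem.Str.endswith f ".*" &&
      PySem.Str.startswith event (PySem.Str.slice f none (some (-2)) ++ ".")) = true
    ↔ ∃ p ∈ (PySem.List.enumerate event.toList).filter (fun p => p.2 == '.'),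
        f = PySem.Str.slice event none (some p.1) ++ ".*" := by
  rw [Bool.and_eq_true, PySem.Str.endswith_eq, PySem.Str.startswith_eq]
  constructor
  · rintro ⟨h1, h2⟩
    rw [PySem.Chars.endswith, List.isSuffixOf_iff_suffix] at h1
    obtain ⟨q, hq⟩ := h1
    have hq2 : f.toList = q ++ ['.', '*'] := by
      simpa using hq.symm
    rw [PySem.Chars.startswith, List.isPrefixOf_iff_prefix, String.toList_append,
      PySem.Str.toList_slice, PySem.Chars.slice_eq_listSlice,
      PySem.List.slice_to_neg_ofNat f.toList 2 (by omega)] at h2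
    have htake : f.toList.take (f.toList.length - 2) = q := by
      rw [hq2]; simp
    rw [htake] at h2
    obtain ⟨r, hr⟩ := h2
    have hr2 : event.toList = q ++ '.' :: r := by
      rw [← hr]; simp
    refine ⟨((q.length : Int), '.'), ?_, ?_⟩
    · rw [List.mem_filter]
      refine ⟨(mem_enumerate_iff _ _ _).mpr ⟨q.length, by simp, ?_⟩, by simp⟩
      rw [hr2, List.getElem?_append_right (le_refl _)]
      simp
    · apply String.toList_injective
      rw [String.toList_append, PySem.Str.toList_slice, PySem.Chars.slice_eq_listSlice,
        PySem.List.slice_to_natCast event.toList q.length, hr2]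
      simp [hq2]
  · rintro ⟨p, hp, rfl⟩
    rw [List.mem_filter] at hp
    obtain ⟨hmem, hdot⟩ := hp
    obtain ⟨k, hk1, hk2⟩ := (mem_enumerate_iff _ _ _).mp hmem
    have hdot' : p.2 = '.' := by simpa using hdot
    have hklt : k < event.toList.length := by
      exact (List.getElem?_eq_some_iff.mp hk2).1
    have hgetk : event.toList[k] = '.' := by
      have := (List.getElem?_eq_some_iff.mp hk2).2
      rw [this, hdot']
    have hp1 : p.1 = (k : Int) := by omega
    have hcand : (PySem.Str.slice event none (some p.1) ++ (".*" : String)).toList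
        = event.toList.take k ++ ['.', '*'] := by
      rw [String.toList_append, PySem.Str.toList_slice, PySem.Chars.slice_eq_listSlice,
        hp1, PySem.List.slice_to_natCast event.toList k]
      rfl
    constructor
    · rw [PySem.Chars.endswith, List.isSuffixOf_iff_suffix, hcand]
      exact ⟨event.toList.take k, rfl⟩
    · rw [PySem.Chars.startswith, List.isPrefixOf_iff_prefix, String.toList_append,
        PySem.Str.toList_slice, PySem.Chars.slice_eq_listSlice, hcand,
        PySem.List.slice_to_neg_ofNat _ 2 (by omega)]
      have hlen : (event.toList.take k ++ ['.', '*']).length - 2 = k := by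
        simp only [List.length_append, List.length_take, List.length_cons, List.length_nil]
        omega
      rw [hlen]
      have htake2 : (event.toList.take k ++ ['.', '*']).take k = event.toList.take k := by
        refine List.take_left' ?_
        simp only [List.length_take]
        omega
      rw [htake2]
      refine ⟨event.toList.drop (k + 1), ?_⟩
      have : event.toList.take k ++ ['.'] ++ event.toList.drop (k + 1)
          = event.toList.take k ++ event.toList.drop k := by
        rw [List.append_assoc]
        congr 1
        rw [← hgetk]
        exact List.getElem_cons_drop hklt
      simpa [List.take_append_drop] using this

theorem event_matches_py_spec : Claim_equal_event_matches_py := by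
  intro filters event _
  unfold Spec_event_matches_py event_matches_py event_matches_py_alt
  by_cases hf : filters = []
  · subst hf
    simp
  · rw [if_neg hf, pvLoopA_eq_any]
    by_cases h1 : filters.contains "*" = true
    · rw [if_pos h1, Bool.eq_iff_iff]
      simp
      exact Or.inl (List.contains_iff_mem.mp h1)
    · rw [if_neg h1]
      by_cases h2 : filters.contains event = true
      · rw [if_pos h2, Bool.eq_iff_iff]
        simp
        exact Or.inr (Or.inl (List.contains_iff_mem.mp h2))
      · rw [if_neg h2, Bool.eq_iff_iff]
        simp only [List.any_append, List.any_cons, List.any_nil, List.any_map, Function.comp,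
          Bool.or_false, Bool.or_eq_true, List.any_eq_true]
        constructor
        · rintro ⟨x, hx, he⟩
          rcases (cond_iff_candidate event x).mp he with ⟨p, hp, rfl⟩
          exact Or.inr ⟨p, hp, List.contains_iff_mem.mpr hx⟩
        · rintro ((h | h) | ⟨p, hp, hc⟩)
          · exact absurd h h1
          · exact absurd h h2
          · exact ⟨_, List.contains_iff_mem.mp hc, (cond_iff_candidate event _).mpr ⟨p, hp, rfl⟩⟩
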